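-- pv_equiv track=rewrite | github.com/jamesfishwick/zettelkasten-mcp | src/slipbox_mcp/services/cluster_service.py | find_tag_clusters
-- ===== SOURCE A (Python) =====
-- from typing import Any, Dict, List, Optional, Set, Tuple
--
-- def find_tag_clusters(cooccurrence: Dict[Tuple[str, str], int]) -> List[Set[str]]:
--     """Group tags that frequently co-occur using union-find approach."""
--     tag_to_cluster: Dict[str, Set[str]] = {}
--     clusters: List[Set[str]] = []
--
--     # Higher-frequency pairs form cluster seeds.
--     for (tag_a, tag_b), count in sorted(cooccurrence.items(), key=lambda x: -x[1]):
--         cluster_a = tag_to_cluster.get(tag_a)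
--         cluster_b = tag_to_cluster.get(tag_b)
--
--         if cluster_a is None and cluster_b is None:
--             new_cluster = {tag_a, tag_b}
--             clusters.append(new_cluster)
--             tag_to_cluster[tag_a] = new_cluster
--             tag_to_cluster[tag_b] = new_cluster
--         elif cluster_a is None:
--             cluster_b.add(tag_a)
--             tag_to_cluster[tag_a] = cluster_b
--         elif cluster_b is None:
--             cluster_a.add(tag_b)
--             tag_to_cluster[tag_b] = cluster_a
--         elif cluster_a is not cluster_b:
--             cluster_a.update(cluster_b)
--             for tag in cluster_b:
--                 tag_to_cluster[tag] = cluster_a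
--             clusters.remove(cluster_b)
--
--     return [c for c in clusters if len(c) >= 2]
-- ===== SOURCE B (Python) =====
-- def find_tag_clusters(cooccurrence):
--     """Union-find: parent-pointer forest with a walking find and one pointer write
--     per union; member lists live in a dict whose insertion order (winner keeps its
--     slot, loser is popped) is the output order."""
--     parent = {}   # tag -> parent tag; roots point to themselves
--     members = {}  # root -> member list; dict order = cluster creation order
--
--     def find(x):
--         while parent[x] != x:
--             x = parent[x]
--         return x
--
--     for (a, b), _ in sorted(cooccurrence.items(), key=lambda kv: -kv[1]):
--         ra = find(a) if a in parent else None
--         rb = find(b) if b in parent else None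
--         if ra is None and rb is None:
--             parent[a] = a
--             parent[b] = a
--             members[a] = [a] if a == b else [a, b]
--         elif ra is None:
--             parent[a] = rb
--             members[rb].append(a)
--         elif rb is None:
--             parent[b] = ra
--             members[ra].append(b)
--         elif ra != rb:
--             parent[rb] = ra
--             members[ra] += members.pop(rb)
--
--     return [set(m) for m in members.values() if len(m) >= 2]
-- ===== Notes on version B (the rewrite author's own statement) =====
-- stated objective: alternative
-- what changed: A stores a shared mutable set per cluster, maps every tag to its set, relabels all of cluster_b's tags and scans the clusters list with list.remove on each merge; B is a union-find: a parent-pointer forest where lookups walk parent links (find) and a union writes one pointer, member lists sitting in a dict whose insertion order directly yields A's cluster order.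
import Mathlib
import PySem

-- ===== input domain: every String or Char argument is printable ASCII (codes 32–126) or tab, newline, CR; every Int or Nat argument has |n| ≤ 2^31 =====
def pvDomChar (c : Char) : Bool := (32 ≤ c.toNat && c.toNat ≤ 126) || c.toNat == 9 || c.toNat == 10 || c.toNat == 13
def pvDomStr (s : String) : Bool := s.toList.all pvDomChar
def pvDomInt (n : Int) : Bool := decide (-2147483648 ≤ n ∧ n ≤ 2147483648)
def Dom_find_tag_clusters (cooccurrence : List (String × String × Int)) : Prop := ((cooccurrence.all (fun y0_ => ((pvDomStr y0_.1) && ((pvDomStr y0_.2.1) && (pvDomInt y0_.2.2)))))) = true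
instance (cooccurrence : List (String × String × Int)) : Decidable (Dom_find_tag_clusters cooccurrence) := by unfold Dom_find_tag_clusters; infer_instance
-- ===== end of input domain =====

-- B replaces A's shared-set bookkeeping (every tag mapped to a mutable cluster-set
-- object, all of cluster_b's tags relabelled and the clusters list scanned with
-- list.remove on every merge) by a union-find parent forest: lookups walk parent
-- pointers (find) and a union writes a single pointer; member lists sit in a dict
-- whose insertion order (winner keeps its slot, loser is popped) is A's cluster
-- order (objective: alternative data structure, similar cost).
-- Return-value equivalence only: the Python functions mutate only local state.

-- ===== PORT A =====
-- A's `clusters` are shared mutable set objects; we model the object heap explicitly: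
-- `t2c` maps a tag to the integer id of its cluster object, `heap` maps ids to set
-- contents, `clus` is A's `clusters` list as a list of ids, `next` is the next fresh id.
-- `cluster_a is not cluster_b` is id inequality; `clusters.remove(cluster_b)` removes
-- cluster_b's id (live clusters are disjoint nonempty sets, so Python's by-equality
-- removal hits exactly the object cluster_b).  The `for tag in cluster_b` relabel loop
-- and `cluster_a.update(cluster_b)` iterate the set in its modelled insertion order;
-- every tag is simply (re)assigned, so the resulting dict lookups do not depend on that
-- iteration order.
structure AState where
  t2c  : PySem.Dict String Int
  heap : PySem.Dict Int (List String)
  clus : List Int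
  next : Int

def stepA (s : AState) (e : (String × String) × Int) : AState :=
  let a := e.1.1
  let b := e.1.2
  match s.t2c.get? a, s.t2c.get? b with
  | none, none =>
      ⟨(s.t2c.insert a s.next).insert b s.next,
       s.heap.insert s.next (PySem.Set.ofList [a, b]),
       s.clus ++ [s.next], s.next + 1⟩
  | none, some ib =>
      ⟨s.t2c.insert a ib, s.heap.modify ib [] (fun c => PySem.Set.add c a), s.clus, s.next⟩
  | some ia, none =>
      ⟨s.t2c.insert b ia, s.heap.modify ia [] (fun c => PySem.Set.add c b), s.clus, s.next⟩
  | some ia, some ib =>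
      if ia ≠ ib then
        let cb := s.heap.getD ib []
        ⟨cb.foldl (fun d t => d.insert t ia) s.t2c,
         s.heap.modify ia [] (fun c => PySem.Set.update c cb),
         -- clusters.remove(cluster_b): cluster_b's id is always in the list (invariant)
         (PySem.List.remove? s.clus ib).getD s.clus,
         s.next⟩
      else s

def find_tag_clusters (cooccurrence : List (String × String × Int)) : List (List String) :=
  let pairs := PySem.List.sorted
    (PySem.Dict.ofList (cooccurrence.map (fun e => ((e.1, e.2.1), e.2.2)))).items
    (fun x => -x.2)
  let s := pairs.foldl stepA ⟨PySem.Dict.empty, PySem.Dict.empty, [], 0⟩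
  (s.clus.map (fun i => s.heap.getD i [])).filter (fun c => decide (2 ≤ c.length))

-- ===== PORT B =====
-- transliteration of Source B: `parent` is the union-find forest (roots point to
-- themselves), `members` maps each root to its member list in join order; the dict's
-- own insertion order is the output order.  Source B's `find` is a while-loop walking
-- parent links; the fuel `parent.items.length + 1` only makes that loop total — under
-- the forest invariant proved below the walk reaches the root within that many steps.
def pvFind (fuel : Nat) (parent : PySem.Dict String String) (x : String) : String :=
  match fuel with
  | 0 => x
  | n + 1 =>
    match parent.get? x with
    | some px => if px = x then x else pvFind n parent px
    | none => x

structure BState where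
  parent  : PySem.Dict String String
  members : PySem.Dict String (List String)

def stepB (s : BState) (e : (String × String) × Int) : BState :=
  let a := e.1.1
  let b := e.1.2
  let fuel := s.parent.items.length + 1
  let ra? := if s.parent.contains a then some (pvFind fuel s.parent a) else none
  let rb? := if s.parent.contains b then some (pvFind fuel s.parent b) else none
  match ra?, rb? with
  | none, none =>
      ⟨(s.parent.insert a a).insert b a,
       s.members.insert a (if a = b then [a] else [a, b])⟩
  | none, some rb =>
      ⟨s.parent.insert a rb, s.members.modify rb [] (fun m => m ++ [a])⟩
  | some ra, none =>
      ⟨s.parent.insert b ra, s.members.modify ra [] (fun m => m ++ [b])⟩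
  | some ra, some rb =>
      if ra ≠ rb then
        -- members[ra] += members.pop(rb)
        let mb := s.members.getD rb []
        ⟨s.parent.insert rb ra, (s.members.erase rb).modify ra [] (fun m => m ++ mb)⟩
      else s

def find_tag_clusters_alt (cooccurrence : List (String × String × Int)) : List (List String) :=
  let pairs := PySem.List.sorted
    (PySem.Dict.ofList (cooccurrence.map (fun e => ((e.1, e.2.1), e.2.2)))).items
    (fun x => -x.2)
  let s := pairs.foldl stepB ⟨PySem.Dict.empty, PySem.Dict.empty⟩
  (s.members.values.filter (fun m => decide (2 ≤ m.length))).map (fun m => PySem.Set.ofList m)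

-- ===== PRECONDITION & SPEC =====
def Spec_find_tag_clusters (cooccurrence : List (String × String × Int)) (out : List (List String)) : Prop := out = find_tag_clusters_alt cooccurrence
instance (cooccurrence : List (String × String × Int)) (out : List (List String)) : Decidable (Spec_find_tag_clusters cooccurrence out) := by unfold Spec_find_tag_clusters; infer_instance

-- ===== CLAIM (what is proved, stated in full; the proofs are below) =====
def Claim_equal_find_tag_clusters : Prop := ∀ (cooccurrence : List (String × String × Int)), Dom_find_tag_clusters cooccurrence → Spec_find_tag_clusters cooccurrence (find_tag_clusters cooccurrence)

-- ===== LEMMAS AND PROOFS =====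

lemma pvGet?_foldl_insert {ν : Type} (l : List String) (v : ν) (d : PySem.Dict String ν) (t : String) :
    (l.foldl (fun d x => d.insert x v) d).get? t = if t ∈ l then some v else d.get? t := by
  induction l generalizing d with
  | nil => simp
  | cons x xs ih =>
    rw [List.foldl_cons, ih]
    by_cases h1 : t ∈ xs
    · simp [h1]
    · by_cases h2 : t = x <;> simp [h1, h2, PySem.Dict.get?_insert]

lemma pvSet_ofList_pair (a b : String) :
    PySem.Set.ofList [a, b] = if a = b then [a] else [a, b] := by
  by_cases h : a = b
  · simp [PySem.Set.ofList_eq_foldl, h]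
  · simp [PySem.Set.ofList_eq_foldl, PySem.Set.add, h, Ne.symm h]

lemma pvSet_update_of_disjoint (s : PySem.Set String) (xs : List String)
    (hd : ∀ x ∈ xs, x ∉ s) (hn : xs.Nodup) : PySem.Set.update s xs = s ++ xs := by
  induction xs generalizing s with
  | nil => simp [PySem.Set.update_nil]
  | cons x t ih =>
    rw [PySem.Set.update_cons, PySem.Set.add_of_not_mem (hd x (by simp))]
    rw [ih (s ++ [x])]
    · simp
    · intro y hy
      simp only [List.mem_append, List.mem_singleton]
      rintro (hys | rfl)
      · exact hd y (by simp [hy]) hys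
      · exact (List.nodup_cons.mp hn).1 hy
    · exact (List.nodup_cons.mp hn).2

lemma pvItems_erase {κ ν : Type} [BEq κ] (d : PySem.Dict κ ν) (k : κ) :
    (d.erase k).items = d.items.filter (fun p => !(p.1 == k)) := rfl

-- the number of forest nodes of strictly smaller rank: the find-walk measure
def pvMeasure (parent : PySem.Dict String String) (rk : String → Nat) (t : String) : Nat :=
  ((parent.keys.toFinset).filter (fun k => rk k < rk t)).card

-- the simulation invariant between A's and B's loop states; `rt` maps a tag to its
-- current root, `rk` is a rank certifying the forest acyclic, `rep` maps A's live
-- cluster ids to the corresponding roots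
structure pvInv (rt : String → String) (rk : String → Nat) (rep : Int → String)
    (sa : AState) (sb : BState) : Prop where
  hdom    : ∀ t, sa.t2c.get? t = none ↔ sb.parent.get? t = none
  hrk     : ∀ t p, sb.parent.get? t = some p → p ≠ t → rk p < rk t
  hrt     : ∀ t p, sb.parent.get? t = some p → rt t = if p = t then t else rt p
  hclosed : ∀ t p, sb.parent.get? t = some p → sb.parent.contains p = true
  ht2c    : ∀ t, sb.parent.contains t = true →
              ∃ i, i ∈ sa.clus ∧ rep i = rt t ∧ sa.t2c.get? t = some i
  hrepinj : ∀ i ∈ sa.clus, ∀ j ∈ sa.clus, rep i = rep j → i = j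
  hrep    : ∀ i ∈ sa.clus, sb.parent.get? (rep i) = some (rep i) ∧ rt (rep i) = rep i
  hitems  : sb.members.items = sa.clus.map (fun i => (rep i, sa.heap.getD i []))
  hmem    : ∀ i ∈ sa.clus, ∀ t, t ∈ sa.heap.getD i [] ↔
              (sb.parent.contains t = true ∧ rt t = rep i)
  hnd     : ∀ i ∈ sa.clus, (sa.heap.getD i []).Nodup
  hinc    : sa.clus.Pairwise (· < ·)
  hlt     : ∀ i ∈ sa.clus, i < sa.next

lemma pvContains_get? {κ ν : Type} [BEq κ] [LawfulBEq κ] (d : PySem.Dict κ ν) (k : κ)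
    (h : d.contains k = true) : ∃ v, d.get? k = some v := by
  rcases hv : d.get? k with _ | v
  · rw [(PySem.Dict.get?_eq_none_iff_contains d k).mp hv] at h
    cases h
  · exact ⟨v, rfl⟩

lemma pvFind_eq (parent : PySem.Dict String String) (rt : String → String) (rk : String → Nat)
    (hrk : ∀ t p, parent.get? t = some p → p ≠ t → rk p < rk t)
    (hrt : ∀ t p, parent.get? t = some p → rt t = if p = t then t else rt p)
    (hclosed : ∀ t p, parent.get? t = some p → parent.contains p = true) :
    ∀ fuel t, parent.contains t = true → pvMeasure parent rk t < fuel →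
      pvFind fuel parent t = rt t := by
  intro fuel
  induction fuel with
  | zero => intro t _ hm; omega
  | succ n ih =>
    intro t ht hm
    obtain ⟨p, hp⟩ := pvContains_get? parent t ht
    by_cases hpt : p = t
    · subst hpt
      rw [show rt p = p from by simpa using hrt _ _ hp]
      simp [pvFind, hp]
    · have hrtp : rt t = rt p := by rw [hrt t p hp, if_neg hpt]
      have hcp : parent.contains p = true := hclosed t p hp
      have hlt : rk p < rk t := hrk t p hp hpt
      have hsub : (parent.keys.toFinset).filter (fun k => rk k < rk p) ⊆
          (parent.keys.toFinset).filter (fun k => rk k < rk t) := by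
        intro x hx
        rw [Finset.mem_filter] at hx ⊢
        exact ⟨hx.1, lt_trans hx.2 hlt⟩
      have hpmem : p ∈ (parent.keys.toFinset).filter (fun k => rk k < rk t) := by
        rw [Finset.mem_filter, List.mem_toFinset]
        exact ⟨(PySem.Dict.contains_iff_mem_keys parent p).mp hcp, hlt⟩
      have hpnot : p ∉ (parent.keys.toFinset).filter (fun k => rk k < rk p) := by
        rw [Finset.mem_filter]
        rintro ⟨_, hc⟩; omega
      have hss : (parent.keys.toFinset).filter (fun k => rk k < rk p) ⊂
          (parent.keys.toFinset).filter (fun k => rk k < rk t) :=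
        Finset.ssubset_iff_of_subset hsub |>.mpr ⟨p, hpmem, hpnot⟩
      have hmlt : pvMeasure parent rk p < pvMeasure parent rk t := Finset.card_lt_card hss
      simp only [pvFind, hp, if_neg hpt]
      rw [ih p hcp (by unfold pvMeasure at hmlt hm ⊢; omega), hrtp]

lemma pvFind_fuel (parent : PySem.Dict String String) (rk : String → Nat) (t : String) :
    pvMeasure parent rk t < parent.items.length + 1 := by
  have h1 : ((parent.keys.toFinset).filter (fun k => rk k < rk t)).card ≤
      parent.keys.toFinset.card := Finset.card_filter_le _ _
  have h2 : parent.keys.toFinset.card ≤ parent.keys.length := parent.keys.toFinset_card_le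
  have h3 : parent.keys.length = parent.items.length := by
    simp only [PySem.Dict.keys, List.length_map]
  unfold pvMeasure
  omega

lemma pvContains_true {κ ν : Type} [BEq κ] [LawfulBEq κ] (d : PySem.Dict κ ν) (k : κ) :
    d.contains k = true ↔ d.get? k ≠ none := by
  rcases hc : d.contains k with _ | _
  · simp [(PySem.Dict.get?_eq_none_iff_contains d k).mpr hc]
  · simp
    intro hn
    rw [(PySem.Dict.get?_eq_none_iff_contains d k).mp hn] at hc
    cases hc

lemma pvStep_none (rt : String → String) (rk : String → Nat) (rep : Int → String)
    (sa : AState) (sb : BState) (a b : String)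
    (h : pvInv rt rk rep sa sb)
    (hpa : sb.parent.get? a = none) (hpb : sb.parent.get? b = none) :
    pvInv (fun t => if t = a ∨ t = b then a else rt t)
          (fun t => if t = a then 0 else if t = b then 1 else rk t + 2)
          (fun i => if i = sa.next then a else rep i)
          ⟨(sa.t2c.insert a sa.next).insert b sa.next,
           sa.heap.insert sa.next (PySem.Set.ofList [a, b]),
           sa.clus ++ [sa.next], sa.next + 1⟩
          ⟨(sb.parent.insert a a).insert b a,
           sb.members.insert a (if a = b then [a] else [a, b])⟩ := by
  have hga : ∀ t p, sb.parent.get? t = some p → t ≠ a ∧ t ≠ b ∧ p ≠ a ∧ p ≠ b := by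
    intro t p hp
    have hcp := h.hclosed t p hp
    have hct : sb.parent.get? t ≠ none := by rw [hp]; simp
    have hcp' : sb.parent.get? p ≠ none := (pvContains_true _ _).mp hcp
    refine ⟨?_, ?_, ?_, ?_⟩ <;> rintro rfl
    · exact hct hpa
    · exact hct hpb
    · exact hcp' hpa
    · exact hcp' hpb
  have hpget : ∀ t, ((sb.parent.insert a a).insert b a).get? t =
      if t = a ∨ t = b then some a else sb.parent.get? t := by
    intro t
    rw [PySem.Dict.get?_insert, PySem.Dict.get?_insert]
    by_cases h1 : t = b <;> by_cases h2 : t = a <;> simp [h1, h2]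
  have htget : ∀ t, ((sa.t2c.insert a sa.next).insert b sa.next).get? t =
      if t = a ∨ t = b then some sa.next else sa.t2c.get? t := by
    intro t
    rw [PySem.Dict.get?_insert, PySem.Dict.get?_insert]
    by_cases h1 : t = b <;> by_cases h2 : t = a <;> simp [h1, h2]
  have hrepa : ∀ i ∈ sa.clus, rep i ≠ a ∧ rep i ≠ b := by
    intro i hi
    have hg := (h.hrep i hi).1
    constructor <;> rintro heq <;> rw [heq] at hg
    · rw [hpa] at hg; cases hg
    · rw [hpb] at hg; cases hg
  have hRne : ∀ i ∈ sa.clus, i ≠ sa.next := fun i hi => ne_of_lt (h.hlt i hi)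
  have hheapD : ∀ i, ((sa.heap.insert sa.next (PySem.Set.ofList [a, b])).getD i []) =
      if i = sa.next then (if a = b then [a] else [a, b]) else sa.heap.getD i [] := by
    intro i
    rw [PySem.Dict.getD_insert, pvSet_ofList_pair]
  have hkeys : sb.members.keys = sa.clus.map rep := by
    simp only [PySem.Dict.keys, h.hitems, List.map_map]
    rfl
  have hmca : sb.members.contains a = false := by
    rcases hc : sb.members.contains a with _ | _
    · rfl
    · exfalso
      have hmem := (PySem.Dict.contains_iff_mem_keys _ _).mp hc
      rw [hkeys] at hmem
      obtain ⟨i, hi, hri⟩ := List.mem_map.mp hmem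
      exact (hrepa i hi).1 hri
  have hmitems : (sb.members.insert a (if a = b then [a] else [a, b])).items =
      sb.members.items ++ [(a, if a = b then [a] else [a, b])] :=
    PySem.Dict.items_insert_of_not_contains _ _ hmca
  have hnomem : ∀ i ∈ sa.clus, ∀ t, t ∈ sa.heap.getD i [] → t ≠ a ∧ t ≠ b := by
    intro i hi t ht
    have hct := ((h.hmem i hi t).mp ht).1
    have := (pvContains_true _ _).mp hct
    constructor <;> rintro rfl
    · exact this hpa
    · exact this hpb
  refine ⟨?_, ?_, ?_, ?_, ?_, ?_, ?_, ?_, ?_, ?_, ?_, ?_⟩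
  · -- hdom
    intro t
    dsimp only
    rw [htget t, hpget t]
    split_ifs with hab
    · simp
    · exact h.hdom t
  · -- hrk
    intro t p hp hne
    dsimp only at hp ⊢
    rw [hpget t] at hp
    by_cases htab : t = a ∨ t = b
    · rw [if_pos htab] at hp
      obtain rfl : a = p := Option.some_inj.mp hp
      rcases htab with rfl | rfl
      · exact absurd rfl hne
      · simp [Ne.symm hne]
    · rw [if_neg htab] at hp
      push Not at htab
      obtain ⟨hta, htb, hpa', hpb'⟩ := hga t p hp
      have := h.hrk t p hp hne
      simp only [if_neg hta, if_neg htb, if_neg hpa', if_neg hpb']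
      omega
  · -- hrt
    intro t p hp
    dsimp only at hp ⊢
    rw [hpget t] at hp
    by_cases htab : t = a ∨ t = b
    · rw [if_pos htab] at hp
      obtain rfl : a = p := Option.some_inj.mp hp
      rcases htab with rfl | rfl
      · simp
      · by_cases hab : a = t
        · subst hab
          simp
        · simp [hab, Ne.symm hab]
    · rw [if_neg htab] at hp
      push Not at htab
      obtain ⟨hta, htb, hpa', hpb'⟩ := hga t p hp
      have := h.hrt t p hp
      simp only [if_neg (by push Not; exact ⟨hta, htb⟩ : ¬(t = a ∨ t = b)),
        if_neg (by push Not; exact ⟨hpa', hpb'⟩ : ¬(p = a ∨ p = b))]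
      exact this
  · -- hclosed
    intro t p hp
    dsimp only at hp ⊢
    rw [hpget t] at hp
    apply (pvContains_true _ _).mpr
    rw [hpget p]
    by_cases htab : t = a ∨ t = b
    · rw [if_pos htab] at hp
      obtain rfl : a = p := Option.some_inj.mp hp
      simp
    · rw [if_neg htab] at hp
      obtain ⟨hta, htb, hpa', hpb'⟩ := hga t p hp
      rw [if_neg (by push Not; exact ⟨hpa', hpb'⟩)]
      exact (pvContains_true _ _).mp (h.hclosed t p hp)
  · -- ht2c
    intro t hct
    dsimp only at hct ⊢
    have hgt := (pvContains_true _ _).mp hct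
    rw [hpget t] at hgt
    by_cases htab : t = a ∨ t = b
    · refine ⟨sa.next, by simp, by simp [htab], ?_⟩
      rw [htget t, if_pos htab]
    · rw [if_neg htab] at hgt
      obtain ⟨i, hi, hri, hti⟩ := h.ht2c t ((pvContains_true _ _).mpr hgt)
      push Not at htab
      refine ⟨i, by simp [hi], ?_, ?_⟩
      · simp only [if_neg (hRne i hi), if_neg (by push Not; exact htab : ¬(t = a ∨ t = b))]
        exact hri
      · rw [htget t, if_neg (by push Not; exact htab)]
        exact hti
  · -- hrepinj
    intro i hi j hj heq
    simp only [List.mem_append, List.mem_singleton] at hi hj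
    rcases hi with hi | rfl <;> rcases hj with hj | rfl
    · rw [if_neg (hRne i hi), if_neg (hRne j hj)] at heq
      exact h.hrepinj i hi j hj heq
    · rw [if_neg (hRne i hi), if_pos rfl] at heq
      exact absurd heq (hrepa i hi).1
    · rw [if_pos rfl, if_neg (hRne j hj)] at heq
      exact absurd heq.symm (hrepa j hj).1
    · rfl
  · -- hrep
    intro i hi
    dsimp only
    simp only [List.mem_append, List.mem_singleton] at hi
    rcases hi with hi | rfl
    · rw [if_neg (hRne i hi)]
      refine ⟨?_, ?_⟩
      · rw [hpget (rep i),
          if_neg (by push Not; exact ⟨(hrepa i hi).1, (hrepa i hi).2⟩)]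
        exact (h.hrep i hi).1
      · rw [if_neg (by push Not; exact ⟨(hrepa i hi).1, (hrepa i hi).2⟩)]
        exact (h.hrep i hi).2
    · rw [if_pos rfl]
      exact ⟨by rw [hpget a]; simp, by simp⟩
  · -- hitems
    rw [hmitems, h.hitems, List.map_append]
    congr 1
    · apply List.map_congr_left
      intro i hi
      rw [if_neg (hRne i hi), hheapD i, if_neg (hRne i hi)]
    · simp [hheapD]
  · -- hmem
    intro i hi t
    dsimp only
    simp only [List.mem_append, List.mem_singleton] at hi
    rw [hheapD i]
    rcases hi with hi | rfl
    · rw [if_neg (hRne i hi), if_neg (hRne i hi)]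
      constructor
      · intro ht
        obtain ⟨hta, htb⟩ := hnomem i hi t ht
        have hold := (h.hmem i hi t).mp ht
        refine ⟨(pvContains_true _ _).mpr ?_, ?_⟩
        · rw [hpget t, if_neg (by push Not; exact ⟨hta, htb⟩)]
          exact (pvContains_true _ _).mp hold.1
        · rw [if_neg (by push Not; exact ⟨hta, htb⟩)]
          exact hold.2
      · rintro ⟨hct, hrt'⟩
        by_cases htab : t = a ∨ t = b
        · rw [if_pos htab] at hrt'
          exact absurd hrt'.symm (hrepa i hi).1
        · rw [if_neg htab] at hrt'
          push Not at htab
          have hgt := (pvContains_true _ _).mp hct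
          rw [hpget t, if_neg (by push Not; exact htab)] at hgt
          exact (h.hmem i hi t).mpr ⟨(pvContains_true _ _).mpr hgt, hrt'⟩
    · rw [if_pos rfl, if_pos rfl]
      have hv : t ∈ (if a = b then [a] else [a, b]) ↔ t = a ∨ t = b := by
        by_cases hab : a = b <;> simp [hab]
      rw [hv]
      constructor
      · intro htab
        refine ⟨(pvContains_true _ _).mpr ?_, by rw [if_pos htab]⟩
        rw [hpget t, if_pos htab]
        simp
      · rintro ⟨hct, hrt'⟩
        by_cases htab : t = a ∨ t = b
        · exact htab
        · exfalso
          rw [if_neg htab] at hrt'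
          push Not at htab
          have hgt := (pvContains_true _ _).mp hct
          rw [hpget t, if_neg (by push Not; exact htab)] at hgt
          obtain ⟨j, hj, hrj, _⟩ := h.ht2c t ((pvContains_true _ _).mpr hgt)
          rw [hrt'] at hrj
          exact (hrepa j hj).1 hrj
  · -- hnd
    intro i hi
    dsimp only
    simp only [List.mem_append, List.mem_singleton] at hi
    rw [hheapD i]
    rcases hi with hi | rfl
    · rw [if_neg (hRne i hi)]
      exact h.hnd i hi
    · rw [if_pos rfl]
      by_cases hab : a = b <;> simp [hab]
  · -- hinc
    dsimp only
    rw [List.pairwise_append]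
    exact ⟨h.hinc, List.pairwise_singleton _ _,
      fun x hx y hy => by rw [List.mem_singleton] at hy; subst hy; exact h.hlt x hx⟩
  · -- hlt
    intro i hi
    dsimp only at hi ⊢
    simp only [List.mem_append, List.mem_singleton] at hi
    rcases hi with hi | rfl
    · have := h.hlt i hi; omega
    · omega

lemma pvStep_graft (rt : String → String) (rk : String → Nat) (rep : Int → String)
    (sa : AState) (sb : BState) (a : String) (i0 : Int)
    (h : pvInv rt rk rep sa sb)
    (hpa : sb.parent.get? a = none) (hi0 : i0 ∈ sa.clus) :
    pvInv (fun t => if t = a then rep i0 else rt t)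
          (fun t => if t = a then rk (rep i0) + 1 else rk t)
          rep
          ⟨sa.t2c.insert a i0,
           sa.heap.modify i0 [] (fun c => PySem.Set.add c a),
           sa.clus, sa.next⟩
          ⟨sb.parent.insert a (rep i0),
           sb.members.modify (rep i0) [] (fun m => m ++ [a])⟩ := by
  have hg0 : sb.parent.get? (rep i0) = some (rep i0) := (h.hrep i0 hi0).1
  have hrt0 : rt (rep i0) = rep i0 := (h.hrep i0 hi0).2
  have hra : rep i0 ≠ a := by
    rintro rfl
    rw [hpa] at hg0
    cases hg0
  have ht2ca : sa.t2c.get? a = none := (h.hdom a).mpr hpa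
  have hkey : ∀ t p, sb.parent.get? t = some p → t ≠ a ∧ p ≠ a := by
    intro t p hp
    constructor <;> rintro rfl
    · rw [hp] at hpa; cases hpa
    · have := (pvContains_true _ _).mp (h.hclosed t _ hp)
      exact this hpa
  have hanot : a ∉ sa.heap.getD i0 [] := by
    intro hmm
    have := ((h.hmem i0 hi0 a).mp hmm).1
    exact (pvContains_true _ _).mp this hpa
  have hclnd : sa.clus.Nodup := h.hinc.imp ne_of_lt
  have hknd : sb.members.keys.Nodup := by
    have : sb.members.keys = sa.clus.map rep := by
      simp only [PySem.Dict.keys, h.hitems, List.map_map]; rfl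
    rw [this]
    exact List.Nodup.map_on (fun x hx y hy hxy => h.hrepinj x hx y hy hxy) hclnd
  have hgetD : sb.members.getD (rep i0) [] = sa.heap.getD i0 [] := by
    apply PySem.Dict.getD_of_mem_items
    · rw [h.hitems]
      exact List.mem_map.mpr ⟨i0, hi0, rfl⟩
    · exact hknd
  have hmcon : sb.members.contains (rep i0) = true := by
    rw [PySem.Dict.contains_iff_mem_keys,
      show sb.members.keys = sa.clus.map rep from by
        simp only [PySem.Dict.keys, h.hitems, List.map_map]; rfl]
    exact List.mem_map.mpr ⟨i0, hi0, rfl⟩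
  have hmodeq : sb.members.modify (rep i0) [] (fun m => m ++ [a]) =
      sb.members.insert (rep i0) (sa.heap.getD i0 [] ++ [a]) := by
    rw [show sb.members.modify (rep i0) [] (fun m => m ++ [a]) =
      sb.members.insert (rep i0) (sb.members.getD (rep i0) [] ++ [a]) from rfl, hgetD]
  have hpget : ∀ t, (sb.parent.insert a (rep i0)).get? t =
      if t = a then some (rep i0) else sb.parent.get? t := fun t => PySem.Dict.get?_insert _ _ _ _
  have htget : ∀ t, (sa.t2c.insert a i0).get? t =
      if t = a then some i0 else sa.t2c.get? t := fun t => PySem.Dict.get?_insert _ _ _ _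
  have hheapD : ∀ i, (sa.heap.modify i0 [] (fun c => PySem.Set.add c a)).getD i [] =
      if i = i0 then sa.heap.getD i0 [] ++ [a] else sa.heap.getD i [] := by
    intro i
    rw [PySem.Dict.getD_modify]
    by_cases hii : i = i0
    · rw [if_pos hii, if_pos hii, PySem.Set.add_of_not_mem hanot]
    · rw [if_neg hii, if_neg hii]
  refine ⟨?_, ?_, ?_, ?_, ?_, ?_, ?_, ?_, ?_, ?_, ?_, ?_⟩
  · -- hdom
    intro t
    dsimp only
    rw [htget t, hpget t]
    by_cases hta : t = a
    · simp [hta]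
    · rw [if_neg hta, if_neg hta]
      exact h.hdom t
  · -- hrk
    intro t p hp hne
    dsimp only at hp ⊢
    rw [hpget t] at hp
    by_cases hta : t = a
    · rw [if_pos hta] at hp
      obtain rfl : rep i0 = p := Option.some_inj.mp hp
      subst hta
      rw [if_neg hra, if_pos rfl]
      omega
    · rw [if_neg hta] at hp
      obtain ⟨_, hpna⟩ := hkey t p hp
      rw [if_neg hta, if_neg hpna]
      exact h.hrk t p hp hne
  · -- hrt
    intro t p hp
    dsimp only at hp ⊢
    rw [hpget t] at hp
    by_cases hta : t = a
    · rw [if_pos hta] at hp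
      obtain rfl : rep i0 = p := Option.some_inj.mp hp
      subst hta
      simp [hra, hrt0]
    · rw [if_neg hta] at hp
      obtain ⟨_, hpna⟩ := hkey t p hp
      rw [if_neg hta]
      by_cases hpt : p = t
      · rw [if_pos hpt]
        rw [h.hrt t p hp, if_pos hpt]
      · rw [if_neg hpt, if_neg hpna]
        rw [h.hrt t p hp, if_neg hpt]
  · -- hclosed
    intro t p hp
    dsimp only at hp ⊢
    rw [hpget t] at hp
    apply (pvContains_true _ _).mpr
    by_cases hta : t = a
    · rw [if_pos hta] at hp
      obtain rfl : rep i0 = p := Option.some_inj.mp hp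
      rw [hpget (rep i0), if_neg hra, hg0]
      simp
    · rw [if_neg hta] at hp
      obtain ⟨_, hpna⟩ := hkey t p hp
      rw [hpget p, if_neg hpna]
      exact (pvContains_true _ _).mp (h.hclosed t p hp)
  · -- ht2c
    intro t hct
    dsimp only at hct ⊢
    have hgt := (pvContains_true _ _).mp hct
    rw [hpget t] at hgt
    by_cases hta : t = a
    · refine ⟨i0, hi0, by rw [if_pos hta], ?_⟩
      rw [htget t, if_pos hta]
    · rw [if_neg hta] at hgt
      obtain ⟨i, hi, hri, hti⟩ := h.ht2c t ((pvContains_true _ _).mpr hgt)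
      refine ⟨i, hi, ?_, ?_⟩
      · rw [if_neg hta]; exact hri
      · rw [htget t, if_neg hta]; exact hti
  · -- hrepinj
    exact h.hrepinj
  · -- hrep
    intro i hi
    dsimp only
    have hia : rep i ≠ a := by
      rintro heq
      have := (h.hrep i hi).1
      rw [heq, hpa] at this
      cases this
    rw [hpget (rep i), if_neg hia, if_neg hia]
    exact h.hrep i hi
  · -- hitems
    show (sb.members.modify (rep i0) [] (fun m => m ++ [a])).items = _
    rw [hmodeq, PySem.Dict.items_insert_of_contains _ _ hmcon, h.hitems, List.map_map]
    apply List.map_congr_left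
    intro i hi
    simp only [Function.comp]
    rw [hheapD i]
    by_cases hii : i = i0
    · subst hii
      simp
    · have : (rep i == rep i0) = false := by
        apply beq_false_of_ne
        intro heq
        exact hii (h.hrepinj i hi i0 hi0 heq)
      simp [this, hii]
  · -- hmem
    intro i hi t
    dsimp only
    rw [hheapD i]
    by_cases hii : i = i0
    · subst hii
      rw [if_pos rfl]
      constructor
      · intro ht
        rcases List.mem_append.mp ht with hold | hnew
        · obtain ⟨hct, hrt'⟩ := (h.hmem i hi t).mp hold
          have hta : t ≠ a := by
            rintro rfl
            exact (pvContains_true _ _).mp hct hpa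
          refine ⟨(pvContains_true _ _).mpr ?_, by rw [if_neg hta]; exact hrt'⟩
          rw [hpget t, if_neg hta]
          exact (pvContains_true _ _).mp hct
        · rw [List.mem_singleton] at hnew
          subst hnew
          refine ⟨(pvContains_true _ _).mpr ?_, by rw [if_pos rfl]⟩
          rw [hpget t, if_pos rfl]
          simp
      · rintro ⟨hct, hrt'⟩
        by_cases hta : t = a
        · subst hta
          simp
        · rw [if_neg hta] at hrt'
          have hgt := (pvContains_true _ _).mp hct
          rw [hpget t, if_neg hta] at hgt
          exact List.mem_append.mpr (Or.inl ((h.hmem i hi t).mpr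
            ⟨(pvContains_true _ _).mpr hgt, hrt'⟩))
    · rw [if_neg hii]
      constructor
      · intro ht
        obtain ⟨hct, hrt'⟩ := (h.hmem i hi t).mp ht
        have hta : t ≠ a := by
          rintro rfl
          exact (pvContains_true _ _).mp hct hpa
        refine ⟨(pvContains_true _ _).mpr ?_, by rw [if_neg hta]; exact hrt'⟩
        rw [hpget t, if_neg hta]
        exact (pvContains_true _ _).mp hct
      · rintro ⟨hct, hrt'⟩
        by_cases hta : t = a
        · rw [if_pos hta] at hrt'
          exact absurd (h.hrepinj i0 hi0 i hi hrt') (fun hh => hii hh.symm)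
        · rw [if_neg hta] at hrt'
          have hgt := (pvContains_true _ _).mp hct
          rw [hpget t, if_neg hta] at hgt
          exact (h.hmem i hi t).mpr ⟨(pvContains_true _ _).mpr hgt, hrt'⟩
  · -- hnd
    intro i hi
    dsimp only
    rw [hheapD i]
    by_cases hii : i = i0
    · rw [if_pos hii]
      exact List.Nodup.append (h.hnd i0 hi0) (List.nodup_singleton a)
        (by simpa using hanot)
    · rw [if_neg hii]
      exact h.hnd i hi
  · -- hinc
    exact h.hinc
  · -- hlt
    exact h.hlt

lemma pvStep_merge (rt : String → String) (rk : String → Nat) (rep : Int → String)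
    (sa : AState) (sb : BState) (ia ib : Int)
    (h : pvInv rt rk rep sa sb)
    (hia : ia ∈ sa.clus) (hib : ib ∈ sa.clus) (hne : ia ≠ ib) :
    pvInv (fun t => if rt t = rep ib then rep ia else rt t)
          (fun t => if rt t = rep ib then rk t + rk (rep ia) + 1 else rk t)
          rep
          ⟨(sa.heap.getD ib []).foldl (fun d t => d.insert t ia) sa.t2c,
           sa.heap.modify ia [] (fun c => PySem.Set.update c (sa.heap.getD ib [])),
           (PySem.List.remove? sa.clus ib).getD sa.clus, sa.next⟩
          ⟨sb.parent.insert (rep ib) (rep ia),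
           (sb.members.erase (rep ib)).modify (rep ia)
             [] (fun m => m ++ sb.members.getD (rep ib) [])⟩ := by
  have hga : sb.parent.get? (rep ia) = some (rep ia) := (h.hrep ia hia).1
  have hgb : sb.parent.get? (rep ib) = some (rep ib) := (h.hrep ib hib).1
  have hrta : rt (rep ia) = rep ia := (h.hrep ia hia).2
  have hrtb : rt (rep ib) = rep ib := (h.hrep ib hib).2
  have hrr : rep ia ≠ rep ib := fun heq => hne (h.hrepinj ia hia ib hib heq)
  have hclnd : sa.clus.Nodup := h.hinc.imp ne_of_lt
  have hknd : sb.members.keys.Nodup := by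
    have : sb.members.keys = sa.clus.map rep := by
      simp only [PySem.Dict.keys, h.hitems, List.map_map]; rfl
    rw [this]
    exact List.Nodup.map_on (fun x hx y hy hxy => h.hrepinj x hx y hy hxy) hclnd
  have hgetDb : sb.members.getD (rep ib) [] = sa.heap.getD ib [] := by
    apply PySem.Dict.getD_of_mem_items
    · rw [h.hitems]; exact List.mem_map.mpr ⟨ib, hib, rfl⟩
    · exact hknd
  have hEitems : (sb.members.erase (rep ib)).items =
      sb.members.items.filter (fun p => !(p.1 == rep ib)) := pvItems_erase _ _
  have hkndE : (sb.members.erase (rep ib)).keys.Nodup := by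
    have hsub : (sb.members.erase (rep ib)).items.Sublist sb.members.items := by
      rw [hEitems]; exact List.filter_sublist
    exact hknd.sublist (hsub.map _)
  have hmemE : (rep ia, sa.heap.getD ia []) ∈ (sb.members.erase (rep ib)).items := by
    rw [hEitems, List.mem_filter]
    refine ⟨by rw [h.hitems]; exact List.mem_map.mpr ⟨ia, hia, rfl⟩, by simpa using hrr⟩
  have hgetDE : (sb.members.erase (rep ib)).getD (rep ia) [] = sa.heap.getD ia [] := by
    apply PySem.Dict.getD_of_mem_items
    · exact hmemE
    · exact hkndE
  have hmconE : (sb.members.erase (rep ib)).contains (rep ia) = true := by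
    rw [PySem.Dict.contains_iff_mem_keys]
    simp only [PySem.Dict.keys]
    exact List.mem_map.mpr ⟨(rep ia, sa.heap.getD ia []), hmemE, rfl⟩
  have hmodeq : (sb.members.erase (rep ib)).modify (rep ia) []
        (fun m => m ++ sb.members.getD (rep ib) []) =
      (sb.members.erase (rep ib)).insert (rep ia)
        (sa.heap.getD ia [] ++ sa.heap.getD ib []) := by
    rw [show (sb.members.erase (rep ib)).modify (rep ia) []
          (fun m => m ++ sb.members.getD (rep ib) []) =
        (sb.members.erase (rep ib)).insert (rep ia)
          ((sb.members.erase (rep ib)).getD (rep ia) [] ++ sb.members.getD (rep ib) [])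
      from rfl, hgetDE, hgetDb]
  have hdisj : ∀ x ∈ sa.heap.getD ib [], x ∉ sa.heap.getD ia [] := by
    intro x hxb hxa
    have h1 := ((h.hmem ib hib x).mp hxb).2
    have h2 := ((h.hmem ia hia x).mp hxa).2
    rw [h1] at h2
    exact hrr h2.symm
  have hclusE : (PySem.List.remove? sa.clus ib).getD sa.clus = sa.clus.erase ib := by
    rw [PySem.List.remove?_eq_some_erase sa.clus ib hib]
    rfl
  have hmemerase : ∀ i : Int, i ∈ sa.clus.erase ib ↔ i ≠ ib ∧ i ∈ sa.clus :=
    fun i => hclnd.mem_erase_iff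
  have hpget : ∀ t, (sb.parent.insert (rep ib) (rep ia)).get? t =
      if t = rep ib then some (rep ia) else sb.parent.get? t :=
    fun t => PySem.Dict.get?_insert _ _ _ _
  have hceq : ∀ t, ((sb.parent.insert (rep ib) (rep ia)).contains t = true) ↔
      sb.parent.contains t = true := by
    intro t
    rw [pvContains_true, pvContains_true, hpget t]
    by_cases htb : t = rep ib
    · subst htb
      rw [if_pos rfl, hgb]
      simp
    · rw [if_neg htb]
  have htget : ∀ t, ((sa.heap.getD ib []).foldl (fun d t => d.insert t ia) sa.t2c).get? t =
      if t ∈ sa.heap.getD ib [] then some ia else sa.t2c.get? t :=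
    fun t => pvGet?_foldl_insert _ _ _ _
  have hheapD : ∀ i, ((sa.heap.modify ia []
        (fun c => PySem.Set.update c (sa.heap.getD ib []))).getD i []) =
      if i = ia then sa.heap.getD ia [] ++ sa.heap.getD ib [] else sa.heap.getD i [] := by
    intro i
    rw [PySem.Dict.getD_modify]
    by_cases hii : i = ia
    · rw [if_pos hii, if_pos hii,
        pvSet_update_of_disjoint _ _ hdisj (h.hnd ib hib)]
    · rw [if_neg hii, if_neg hii]
  have hmbmem : ∀ t, t ∈ sa.heap.getD ib [] ↔
      (sb.parent.contains t = true ∧ rt t = rep ib) := h.hmem ib hib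
  have hmamem : ∀ t, t ∈ sa.heap.getD ia [] ↔
      (sb.parent.contains t = true ∧ rt t = rep ia) := h.hmem ia hia
  refine ⟨?_, ?_, ?_, ?_, ?_, ?_, ?_, ?_, ?_, ?_, ?_, ?_⟩
  · -- hdom
    intro t
    dsimp only
    rw [htget t, hpget t]
    by_cases hmb : t ∈ sa.heap.getD ib []
    · have hct := ((hmbmem t).mp hmb).1
      have hgt := (pvContains_true _ _).mp hct
      rw [if_pos hmb]
      by_cases htb : t = rep ib
      · rw [if_pos htb]; simp
      · rw [if_neg htb]
        simp only [false_iff, reduceCtorEq]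
        exact hgt
    · rw [if_neg hmb]
      by_cases htb : t = rep ib
      · subst htb
        rw [if_pos rfl, (h.hdom _)]
        rw [hgb]
        simp
      · rw [if_neg htb]
        exact h.hdom t
  · -- hrk
    intro t p hp hpt
    dsimp only at hp ⊢
    rw [hpget t] at hp
    by_cases htb : t = rep ib
    · rw [if_pos htb] at hp
      obtain rfl : rep ia = p := Option.some_inj.mp hp
      subst htb
      rw [if_neg (by rw [hrta]; exact hrr), if_pos hrtb]
      omega
    · rw [if_neg htb] at hp
      have hrteq : rt t = rt p := by rw [h.hrt t p hp, if_neg hpt]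
      have := h.hrk t p hp hpt
      rw [show rt p = rt t from hrteq.symm]
      by_cases hcond : rt t = rep ib
      · rw [if_pos hcond, if_pos hcond]
        omega
      · rw [if_neg hcond, if_neg hcond]
        omega
  · -- hrt
    intro t p hp
    dsimp only at hp ⊢
    rw [hpget t] at hp
    by_cases htb : t = rep ib
    · rw [if_pos htb] at hp
      obtain rfl : rep ia = p := Option.some_inj.mp hp
      subst htb
      simp [hrtb, hrta, hrr]
    · rw [if_neg htb] at hp
      by_cases hpt : p = t
      · subst hpt
        have hroot : rt p = p := by
          have := h.hrt p p hp
          simpa using this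
        rw [if_pos rfl, hroot, if_neg htb]
      · have hrteq : rt t = rt p := by rw [h.hrt t p hp, if_neg hpt]
        rw [if_neg hpt, hrteq]
  · -- hclosed
    intro t p hp
    dsimp only at hp ⊢
    rw [hpget t] at hp
    apply (pvContains_true _ _).mpr
    rw [hpget p]
    by_cases htb : t = rep ib
    · rw [if_pos htb] at hp
      obtain rfl : rep ia = p := Option.some_inj.mp hp
      rw [if_neg hrr, hga]
      simp
    · rw [if_neg htb] at hp
      have := (pvContains_true _ _).mp (h.hclosed t p hp)
      by_cases hpb : p = rep ib
      · rw [if_pos hpb]; simp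
      · rw [if_neg hpb]; exact this
  · -- ht2c
    intro t hct
    dsimp only at hct ⊢
    have hctold : sb.parent.contains t = true := (hceq t).mp hct
    obtain ⟨i, hi, hri, hti⟩ := h.ht2c t hctold
    rw [hclusE]
    by_cases hcond : rt t = rep ib
    · refine ⟨ia, (hmemerase ia).mpr ⟨hne, hia⟩, by rw [if_pos hcond], ?_⟩
      rw [htget t, if_pos ((hmbmem t).mpr ⟨hctold, hcond⟩)]
    · have hiib : i ≠ ib := by
        rintro rfl
        exact hcond hri.symm
      refine ⟨i, (hmemerase i).mpr ⟨hiib, hi⟩, by rw [if_neg hcond]; exact hri, ?_⟩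
      rw [htget t, if_neg (fun hmm => hcond ((hmbmem t).mp hmm).2)]
      exact hti
  · -- hrepinj
    intro i hi j hj heq
    dsimp only at hi hj
    rw [hclusE] at hi hj
    exact h.hrepinj i (List.mem_of_mem_erase hi) j (List.mem_of_mem_erase hj) heq
  · -- hrep
    intro i hi
    dsimp only at hi ⊢
    rw [hclusE] at hi
    obtain ⟨hiib, hi⟩ := (hmemerase i).mp hi
    have hrineb : rep i ≠ rep ib := fun heq => hiib (h.hrepinj i hi ib hib heq)
    rw [hpget (rep i), if_neg hrineb, if_neg (by rw [(h.hrep i hi).2]; exact hrineb)]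
    exact h.hrep i hi
  · -- hitems
    show ((sb.members.erase (rep ib)).modify (rep ia) []
        (fun m => m ++ sb.members.getD (rep ib) [])).items = _
    rw [hmodeq, PySem.Dict.items_insert_of_contains _ _ hmconE, hEitems, h.hitems,
      List.filter_map, hclusE]
    have hfilter : List.filter ((fun p => !p.1 == rep ib) ∘
        fun i => (rep i, sa.heap.getD i [])) sa.clus = sa.clus.erase ib := by
      rw [List.Nodup.erase_eq_filter hclnd]
      apply List.filter_congr
      intro i hi
      simp only [Function.comp_apply]
      by_cases hii : i = ib
      · subst hii
        simp
      · have hni : rep i ≠ rep ib := fun heq => hii (h.hrepinj i hi ib hib heq)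
        simp [bne, beq_false_of_ne hni, beq_false_of_ne hii]
    rw [hfilter, List.map_map]
    apply List.map_congr_left
    intro i hi
    obtain ⟨hiib, hic⟩ := (hmemerase i).mp hi
    simp only [Function.comp_apply]
    rw [hheapD i]
    by_cases hiia : i = ia
    · subst hiia
      simp
    · have : (rep i == rep ia) = false := by
        apply beq_false_of_ne
        intro heq
        exact hiia (h.hrepinj i hic ia hia heq)
      simp [this, hiia]
  · -- hmem
    intro i hi t
    dsimp only at hi ⊢
    rw [hclusE] at hi
    obtain ⟨hiib, hic⟩ := (hmemerase i).mp hi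
    rw [hheapD i, hceq t]
    by_cases hiia : i = ia
    · subst hiia
      rw [if_pos rfl]
      constructor
      · intro ht
        rcases List.mem_append.mp ht with hma | hmb
        · obtain ⟨hct, hrt'⟩ := (hmamem t).mp hma
          exact ⟨hct, by rw [hrt', if_neg hrr]⟩
        · obtain ⟨hct, hrt'⟩ := (hmbmem t).mp hmb
          exact ⟨hct, by rw [hrt', if_pos rfl]⟩
      · rintro ⟨hct, hrt'⟩
        by_cases hcond : rt t = rep ib
        · exact List.mem_append.mpr (Or.inr ((hmbmem t).mpr ⟨hct, hcond⟩))
        · rw [if_neg hcond] at hrt'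
          exact List.mem_append.mpr (Or.inl ((hmamem t).mpr ⟨hct, hrt'⟩))
    · rw [if_neg hiia]
      constructor
      · intro ht
        obtain ⟨hct, hrt'⟩ := (h.hmem i hic t).mp ht
        refine ⟨hct, ?_⟩
        have hcond : rt t ≠ rep ib := by
          rw [hrt']
          exact fun heq => hiib (h.hrepinj i hic ib hib heq)
        rw [if_neg hcond]
        exact hrt'
      · rintro ⟨hct, hrt'⟩
        by_cases hcond : rt t = rep ib
        · rw [if_pos hcond] at hrt'
          exact absurd (h.hrepinj ia hia i hic hrt') (fun heq => hiia heq.symm)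
        · rw [if_neg hcond] at hrt'
          exact (h.hmem i hic t).mpr ⟨hct, hrt'⟩
  · -- hnd
    intro i hi
    dsimp only at hi ⊢
    rw [hclusE] at hi
    obtain ⟨hiib, hic⟩ := (hmemerase i).mp hi
    rw [hheapD i]
    by_cases hiia : i = ia
    · rw [if_pos hiia]
      exact List.Nodup.append (h.hnd ia hia) (h.hnd ib hib)
        (fun x hxa hxb => hdisj x hxb hxa)
    · rw [if_neg hiia]
      exact h.hnd i hic
  · -- hinc
    dsimp only
    rw [hclusE]
    exact h.hinc.sublist (List.erase_sublist)
  · -- hlt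
    intro i hi
    dsimp only at hi ⊢
    rw [hclusE] at hi
    exact h.hlt i (List.mem_of_mem_erase hi)

lemma pvStep_inv (rt : String → String) (rk : String → Nat) (rep : Int → String)
    (sa : AState) (sb : BState) (e : (String × String) × Int)
    (h : pvInv rt rk rep sa sb) :
    ∃ rt' rk' rep', pvInv rt' rk' rep' (stepA sa e) (stepB sb e) := by
  obtain ⟨⟨a, b⟩, w⟩ := e
  have hfind : ∀ t, sb.parent.contains t = true →
      pvFind (sb.parent.items.length + 1) sb.parent t = rt t :=
    fun t ht => pvFind_eq sb.parent rt rk h.hrk h.hrt h.hclosed _ t ht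
      (pvFind_fuel sb.parent rk t)
  rcases hca : sb.parent.contains a with _ | _ <;>
    rcases hcb : sb.parent.contains b with _ | _
  · -- both fresh
    have hpa : sb.parent.get? a = none := (PySem.Dict.get?_eq_none_iff_contains _ _).mpr hca
    have hpb : sb.parent.get? b = none := (PySem.Dict.get?_eq_none_iff_contains _ _).mpr hcb
    have hta : sa.t2c.get? a = none := (h.hdom a).mpr hpa
    have htb : sa.t2c.get? b = none := (h.hdom b).mpr hpb
    have hA : stepA sa ((a, b), w) = ⟨(sa.t2c.insert a sa.next).insert b sa.next,
        sa.heap.insert sa.next (PySem.Set.ofList [a, b]), sa.clus ++ [sa.next],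
        sa.next + 1⟩ := by
      simp only [stepA, hta, htb]
    have hB : stepB sb ((a, b), w) = ⟨(sb.parent.insert a a).insert b a,
        sb.members.insert a (if a = b then [a] else [a, b])⟩ := by
      simp only [stepB, hca, hcb, Bool.false_eq_true, if_false]
    rw [hA, hB]
    exact ⟨_, _, _, pvStep_none rt rk rep sa sb a b h hpa hpb⟩
  · -- a fresh, b rooted
    have hpa : sb.parent.get? a = none := (PySem.Dict.get?_eq_none_iff_contains _ _).mpr hca
    have hta : sa.t2c.get? a = none := (h.hdom a).mpr hpa
    obtain ⟨ib, hibc, hibr, hibt⟩ := h.ht2c b hcb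
    have hA : stepA sa ((a, b), w) = ⟨sa.t2c.insert a ib,
        sa.heap.modify ib [] (fun c => PySem.Set.add c a), sa.clus, sa.next⟩ := by
      simp only [stepA, hta, hibt]
    have hB : stepB sb ((a, b), w) = ⟨sb.parent.insert a (rep ib),
        sb.members.modify (rep ib) [] (fun m => m ++ [a])⟩ := by
      simp only [stepB, hca, hcb, Bool.false_eq_true, if_false, if_true,
        hfind b hcb, ← hibr]
    rw [hA, hB]
    exact ⟨_, _, _, pvStep_graft rt rk rep sa sb a ib h hpa hibc⟩
  · -- b fresh, a rooted
    have hpb : sb.parent.get? b = none := (PySem.Dict.get?_eq_none_iff_contains _ _).mpr hcb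
    have htb : sa.t2c.get? b = none := (h.hdom b).mpr hpb
    obtain ⟨ia, hiac, hiar, hiat⟩ := h.ht2c a hca
    have hA : stepA sa ((a, b), w) = ⟨sa.t2c.insert b ia,
        sa.heap.modify ia [] (fun c => PySem.Set.add c b), sa.clus, sa.next⟩ := by
      simp only [stepA, htb, hiat]
    have hB : stepB sb ((a, b), w) = ⟨sb.parent.insert b (rep ia),
        sb.members.modify (rep ia) [] (fun m => m ++ [b])⟩ := by
      simp only [stepB, hca, hcb, Bool.false_eq_true, if_false, if_true,
        hfind a hca, ← hiar]
    rw [hA, hB]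
    exact ⟨_, _, _, pvStep_graft rt rk rep sa sb b ia h hpb hiac⟩
  · -- both rooted
    obtain ⟨ia, hiac, hiar, hiat⟩ := h.ht2c a hca
    obtain ⟨ib, hibc, hibr, hibt⟩ := h.ht2c b hcb
    by_cases hid : ia = ib
    · -- same cluster: both skip
      refine ⟨rt, rk, rep, ?_⟩
      have hrr : rt a = rt b := by rw [← hiar, hid, hibr]
      have hA : stepA sa ((a, b), w) = sa := by
        simp only [stepA, hiat, hibt, if_neg (not_not_intro hid)]
      have hB : stepB sb ((a, b), w) = sb := by
        simp only [stepB, hca, hcb, if_true, hfind a hca, hfind b hcb,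
          if_neg (not_not_intro hrr)]
      rw [hA, hB]
      exact h
    · have hrr : rt a ≠ rt b := fun hc => hid (by
        apply h.hrepinj ia hiac ib hibc
        rw [hiar, hibr, hc])
      have hA : stepA sa ((a, b), w) =
          ⟨(sa.heap.getD ib []).foldl (fun d t => d.insert t ia) sa.t2c,
           sa.heap.modify ia [] (fun c => PySem.Set.update c (sa.heap.getD ib [])),
           (PySem.List.remove? sa.clus ib).getD sa.clus, sa.next⟩ := by
        simp only [stepA, hiat, hibt, if_pos hid]
      have hB : stepB sb ((a, b), w) = ⟨sb.parent.insert (rep ib) (rep ia),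
          (sb.members.erase (rep ib)).modify (rep ia)
            [] (fun m => m ++ sb.members.getD (rep ib) [])⟩ := by
        have hrr' : rt a ≠ rt b := hrr
        simp only [stepB, hca, hcb, if_true, hfind a hca, hfind b hcb, ← hiar, ← hibr]
        rw [if_pos (by rw [hiar, hibr]; exact hrr)]
      rw [hA, hB]
      exact ⟨_, _, _, pvStep_merge rt rk rep sa sb ia ib h hiac hibc hid⟩

lemma pvFoldl_inv (l : List ((String × String) × Int)) (rt : String → String)
    (rk : String → Nat) (rep : Int → String) (sa : AState) (sb : BState)
    (h : pvInv rt rk rep sa sb) :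
    ∃ rt' rk' rep', pvInv rt' rk' rep' (l.foldl stepA sa) (l.foldl stepB sb) := by
  induction l generalizing rt rk rep sa sb with
  | nil => exact ⟨rt, rk, rep, h⟩
  | cons e t ih =>
    obtain ⟨rt', rk', rep', h'⟩ := pvStep_inv rt rk rep sa sb e h
    exact ih rt' rk' rep' _ _ h'

lemma pvInv_init : pvInv id (fun _ => 0) (fun _ => "")
    ⟨PySem.Dict.empty, PySem.Dict.empty, [], 0⟩ ⟨PySem.Dict.empty, PySem.Dict.empty⟩ := by
  refine ⟨?_, ?_, ?_, ?_, ?_, ?_, ?_, ?_, ?_, ?_, ?_, ?_⟩ <;>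
    first
      | rfl
      | simp [PySem.Dict.get?_empty, PySem.Dict.contains_empty]

lemma pvFinal_eq (rt : String → String) (rk : String → Nat) (rep : Int → String)
    (sa : AState) (sb : BState) (h : pvInv rt rk rep sa sb) :
    (sa.clus.map (fun i => sa.heap.getD i [])).filter (fun c => decide (2 ≤ c.length)) =
    (sb.members.values.filter (fun m => decide (2 ≤ m.length))).map
      (fun m => PySem.Set.ofList m) := by
  have hvals : sb.members.values = sa.clus.map (fun i => sa.heap.getD i []) := by
    simp only [PySem.Dict.values, h.hitems, List.map_map]
    rfl
  rw [hvals]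
  rw [List.map_congr_left (l := (sa.clus.map (fun i => sa.heap.getD i [])).filter
      (fun c => decide (2 ≤ c.length))) (g := id) ?_, List.map_id]
  intro m hm
  have hm' : m ∈ sa.clus.map (fun i => sa.heap.getD i []) := List.mem_of_mem_filter hm
  obtain ⟨i, hi, rfl⟩ := List.mem_map.mp hm'
  exact PySem.Set.ofList_eq_self_of_nodup _ (h.hnd i hi)

-- ===== VERDICT (by name: the statement is the Claim_ definition above) =====
theorem find_tag_clusters_spec : Claim_equal_find_tag_clusters := by
  intro c _
  unfold Spec_find_tag_clusters find_tag_clusters find_tag_clusters_alt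
  obtain ⟨rt, rk, rep, h⟩ := pvFoldl_inv _ id (fun _ => 0) (fun _ => "") _ _ pvInv_init
  exact pvFinal_eq rt rk rep _ _ h
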